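-- pv_equiv track=rewrite | github.com/d3banjan/lazy-rudder-paper | scripts/two_point_correlator_delta.py | headline_verdict
-- ===== SOURCE A (Python) =====
-- def headline_verdict(per_model: dict) -> tuple[str, str]:
--     """
--     Determine headline verdict:
--       a: SFT/DPO show double-mode, base does not
--       b: base also shows double-mode
--       c: all single-mode
--       d: mixed
--     """
--     base_v = per_model.get("410m_base", {}).get("verdict_summary", "single-mode")
--     sft_v = per_model.get("410m_sft", {}).get("verdict_summary", "single-mode")
--     dpo_v = per_model.get("410m_dpo", {}).get("verdict_summary", "single-mode")
--
--     base_double = "double" in base_v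
--     sft_double = "double" in sft_v
--     dpo_double = "double" in dpo_v
--
--     if not base_double and not sft_double and not dpo_double:
--         return "c", "No bound state in any model — quasiparticle hypothesis falsified."
--     if base_double:
--         return "b", "Base model already shows double-mode structure — bound state is pretraining-level, not training-induced."
--     if sft_double or dpo_double:
--         aligned = [m for m, d in [("SFT", sft_double), ("DPO", dpo_double)] if d]
--         not_aligned = [m for m, d in [("SFT", sft_double), ("DPO", dpo_double)] if not d]
--         if not_aligned:
--             return "d", f"Mixed: {', '.join(aligned)} show double-mode, {', '.join(not_aligned)} do not."
--         return "a", "Quasiparticle confirmed: SFT and DPO show double-mode slow bound state; base does not."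
--     return "d", "Mixed or inconclusive."
-- ===== SOURCE B (Python) =====
-- # Table-driven dispatch: compute the three booleans once, then return via a single
-- # lookup in a precomputed 8-entry verdict table instead of an if/elif cascade.
--
-- _VERDICT_TABLE = {
--     (False, False, False): ("c", "No bound state in any model — quasiparticle hypothesis falsified."),
--     (False, False, True):  ("d", "Mixed: DPO show double-mode, SFT do not."),
--     (False, True,  False): ("d", "Mixed: SFT show double-mode, DPO do not."),
--     (False, True,  True):  ("a", "Quasiparticle confirmed: SFT and DPO show double-mode slow bound state; base does not."),
--     (True,  False, False): ("b", "Base model already shows double-mode structure — bound state is pretraining-level, not training-induced."),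
--     (True,  False, True):  ("b", "Base model already shows double-mode structure — bound state is pretraining-level, not training-induced."),
--     (True,  True,  False): ("b", "Base model already shows double-mode structure — bound state is pretraining-level, not training-induced."),
--     (True,  True,  True):  ("b", "Base model already shows double-mode structure — bound state is pretraining-level, not training-induced."),
-- }
--
--
-- def headline_verdict(per_model: dict) -> tuple[str, str]:
--     def dbl(key: str) -> bool:
--         return "double" in per_model.get(key, {}).get("verdict_summary", "single-mode")
--
--     return _VERDICT_TABLE[(dbl("410m_base"), dbl("410m_sft"), dbl("410m_dpo"))]
-- ===== Notes on version B (the rewrite author's own statement) =====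
-- stated objective: simpler
-- what changed: Replaces A's if/elif cascade with list-comprehension message assembly by a single lookup of the (base,sft,dpo) boolean triple in a precomputed 8-entry verdict table.
import Mathlib
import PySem

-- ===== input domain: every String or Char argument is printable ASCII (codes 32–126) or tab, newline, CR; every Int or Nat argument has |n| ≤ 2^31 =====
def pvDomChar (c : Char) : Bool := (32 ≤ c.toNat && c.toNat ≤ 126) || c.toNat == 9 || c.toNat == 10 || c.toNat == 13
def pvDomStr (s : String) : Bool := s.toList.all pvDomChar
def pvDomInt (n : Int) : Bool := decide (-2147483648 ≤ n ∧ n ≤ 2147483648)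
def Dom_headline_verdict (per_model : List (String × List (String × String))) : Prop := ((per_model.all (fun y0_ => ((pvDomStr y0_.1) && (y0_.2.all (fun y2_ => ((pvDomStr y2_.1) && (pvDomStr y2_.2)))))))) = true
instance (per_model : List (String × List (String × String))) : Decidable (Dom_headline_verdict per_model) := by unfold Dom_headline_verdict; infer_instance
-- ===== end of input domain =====

-- B replaces A's if/elif cascade and comprehension-built messages by one lookup in a precomputed 8-entry table (simpler decomposition; same cost).

-- ===== PORT A =====
def headline_verdict (per_model : List (String × List (String × String))) : String × String :=
  let base_v := PySem.Dict.getD (PySem.Dict.mk (PySem.Dict.getD (PySem.Dict.mk per_model) "410m_base" [])) "verdict_summary" "single-mode"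
  let sft_v := PySem.Dict.getD (PySem.Dict.mk (PySem.Dict.getD (PySem.Dict.mk per_model) "410m_sft" [])) "verdict_summary" "single-mode"
  let dpo_v := PySem.Dict.getD (PySem.Dict.mk (PySem.Dict.getD (PySem.Dict.mk per_model) "410m_dpo" [])) "verdict_summary" "single-mode"
  let base_double := PySem.Str.isIn "double" base_v
  let sft_double := PySem.Str.isIn "double" sft_v
  let dpo_double := PySem.Str.isIn "double" dpo_v
  if !base_double && !sft_double && !dpo_double then
    ("c", "No bound state in any model — quasiparticle hypothesis falsified.")
  else if base_double then
    ("b", "Base model already shows double-mode structure — bound state is pretraining-level, not training-induced.")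
  else if sft_double || dpo_double then
    let aligned := (([("SFT", sft_double), ("DPO", dpo_double)]).filter (fun p => p.2)).map Prod.fst
    let not_aligned := (([("SFT", sft_double), ("DPO", dpo_double)]).filter (fun p => !p.2)).map Prod.fst
    if not_aligned.isEmpty = false then
      ("d", "Mixed: " ++ PySem.Str.join ", " aligned ++ " show double-mode, " ++ PySem.Str.join ", " not_aligned ++ " do not.")
    else
      ("a", "Quasiparticle confirmed: SFT and DPO show double-mode slow bound state; base does not.")
  else
    ("d", "Mixed or inconclusive.")

-- ===== PORT B =====
def hvTable : PySem.Dict (Bool × Bool × Bool) (String × String) :=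
  PySem.Dict.mk [ ((false, false, false), ("c", "No bound state in any model — quasiparticle hypothesis falsified.")),
    ((false, false, true),  ("d", "Mixed: DPO show double-mode, SFT do not.")),
    ((false, true,  false), ("d", "Mixed: SFT show double-mode, DPO do not.")),
    ((false, true,  true),  ("a", "Quasiparticle confirmed: SFT and DPO show double-mode slow bound state; base does not.")),
    ((true,  false, false), ("b", "Base model already shows double-mode structure — bound state is pretraining-level, not training-induced.")),
    ((true,  false, true),  ("b", "Base model already shows double-mode structure — bound state is pretraining-level, not training-induced.")),
    ((true,  true,  false), ("b", "Base model already shows double-mode structure — bound state is pretraining-level, not training-induced.")),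
    ((true,  true,  true),  ("b", "Base model already shows double-mode structure — bound state is pretraining-level, not training-induced.")) ]

def headline_verdict_alt (per_model : List (String × List (String × String))) : String × String :=
  let dbl := fun (key : String) =>
    PySem.Str.isIn "double" (PySem.Dict.getD (PySem.Dict.mk (PySem.Dict.getD (PySem.Dict.mk per_model) key [])) "verdict_summary" "single-mode")
  -- the table covers all 8 triples, so the KeyError branch is unreachable
  match PySem.Dict.get? hvTable (dbl "410m_base", dbl "410m_sft", dbl "410m_dpo") with
  | some v => v
  | none => ("", "")

-- ===== PRECONDITION & SPEC =====
def Spec_headline_verdict (per_model : List (String × List (String × String))) (out : String × String) : Prop := out = headline_verdict_alt per_model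
instance (per_model : List (String × List (String × String))) (out : String × String) : Decidable (Spec_headline_verdict per_model out) := by unfold Spec_headline_verdict; infer_instance

-- ===== CLAIM (what is proved, stated in full; the proofs are below) =====
def Claim_equal_headline_verdict : Prop := ∀ (per_model : List (String × List (String × String))), Dom_headline_verdict per_model → Spec_headline_verdict per_model (headline_verdict per_model)

-- ===== LEMMAS AND PROOFS =====

-- ===== VERDICT (by name: the statement is the Claim_ definition above) =====
theorem headline_verdict_spec : Claim_equal_headline_verdict := by
  intro per_model _
  unfold Spec_headline_verdict headline_verdict headline_verdict_alt
  by_cases hb : PySem.Str.isIn "double" (PySem.Dict.getD (PySem.Dict.mk (PySem.Dict.getD (PySem.Dict.mk per_model) "410m_base" [])) "verdict_summary" "single-mode") = true <;>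
  by_cases hs : PySem.Str.isIn "double" (PySem.Dict.getD (PySem.Dict.mk (PySem.Dict.getD (PySem.Dict.mk per_model) "410m_sft" [])) "verdict_summary" "single-mode") = true <;>
  by_cases hd : PySem.Str.isIn "double" (PySem.Dict.getD (PySem.Dict.mk (PySem.Dict.getD (PySem.Dict.mk per_model) "410m_dpo" [])) "verdict_summary" "single-mode") = true <;>
  simp_all [hvTable, PySem.Dict.get?] <;> decide
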